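-- pv_equiv track=rewrite | github.com/AvinashMada123/wavelength-v3 | app/services/queue_processor.py | _normalize_template_vars
-- ===== SOURCE A (Python) =====
-- def _normalize_template_vars(template_vars: dict[str, str]) -> dict[str, str]:
--     """Normalize common external variable aliases into prompt placeholder names."""
--     normalized = dict(template_vars)
--
--     alias_map = {
--         "event_host": (
--             "event_hostname",
--             "eventHostName",
--             "eventHost",
--             "hostname",
--             "hostName",
--             "host_name",
--         ),
--         "customer_profession": (
--             "profession",
--             "customerProfession",
--             "customer_profession",
--             "customerProfessionName",
--         ),
--         "customer_name": ("name", "contact_name", "contactName", "customerName"),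
--     }
--
--     def canonical(key: str) -> str:
--         return "".join(ch for ch in key.lower() if ch.isalnum())
--
--     present_by_canonical = {
--         canonical(str(key)): value
--         for key, value in normalized.items()
--         if value not in (None, "")
--     }
--
--     for target_key, aliases in alias_map.items():
--         if normalized.get(target_key):
--             continue
--         for alias in aliases:
--             value = normalized.get(alias)
--             if not value:
--                 value = present_by_canonical.get(canonical(alias))
--             if value:
--                 normalized[target_key] = value
--                 break
--
--     return normalized
-- ===== SOURCE B (Python) =====
-- def _normalize_template_vars(template_vars: dict[str, str]) -> dict[str, str]:
--     """Normalize common external variable aliases into prompt placeholder names."""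
--     normalized = dict(template_vars)
--
--     alias_map = {
--         "event_host": (
--             "event_hostname",
--             "eventHostName",
--             "eventHost",
--             "hostname",
--             "hostName",
--             "host_name",
--         ),
--         "customer_profession": (
--             "profession",
--             "customerProfession",
--             "customer_profession",
--             "customerProfessionName",
--         ),
--         "customer_name": ("name", "contact_name", "contactName", "customerName"),
--     }
--
--     def canonical(key: str) -> str:
--         return "".join(ch for ch in key.lower() if ch.isalnum())
--
--     def find_by_canonical(alias: str):
--         # last (insertion-order) non-empty value whose key matches alias canonically
--         wanted = canonical(alias)
--         found = None
--         for key, value in template_vars.items():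
--             if value not in (None, "") and canonical(str(key)) == wanted:
--                 found = value
--         return found
--
--     def resolve(aliases):
--         for alias in aliases:
--             value = normalized.get(alias) or find_by_canonical(alias)
--             if value:
--                 return value
--         return None
--
--     for target_key, aliases in alias_map.items():
--         if not normalized.get(target_key):
--             value = resolve(aliases)
--             if value:
--                 normalized[target_key] = value
--
--     return normalized
-- ===== Notes on version B (the rewrite author's own statement) =====
-- stated objective: alternative
-- what changed: Removed the precomputed canonical-key index dict: a find_by_canonical helper scans the input linearly on demand keeping the last non-empty canonical match, and the break-driven alias loop is refactored into a resolve helper returning the first truthy hit with a single insertion point.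
import Mathlib
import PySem

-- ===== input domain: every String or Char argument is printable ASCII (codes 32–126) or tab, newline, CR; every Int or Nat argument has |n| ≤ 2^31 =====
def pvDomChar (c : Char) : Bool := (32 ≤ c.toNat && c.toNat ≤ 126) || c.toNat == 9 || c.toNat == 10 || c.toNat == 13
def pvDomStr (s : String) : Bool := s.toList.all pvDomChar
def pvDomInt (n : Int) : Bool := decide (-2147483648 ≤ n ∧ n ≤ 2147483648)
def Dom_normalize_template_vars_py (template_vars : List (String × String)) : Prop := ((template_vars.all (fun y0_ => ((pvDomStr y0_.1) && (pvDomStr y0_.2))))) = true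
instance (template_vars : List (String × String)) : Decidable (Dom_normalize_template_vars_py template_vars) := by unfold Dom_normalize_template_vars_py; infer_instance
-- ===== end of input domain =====

-- B replaces A's precomputed canonical-key index dict by an on-demand last-match scan of the
-- input and refactors the alias loop into a resolve helper returning the first hit (alternative).

-- shared literal: the alias map, in A's (and B's) source order
def pvAliasMap : List (String × List String) :=
  [("event_host",
     ["event_hostname", "eventHostName", "eventHost", "hostname", "hostName", "host_name"]),
   ("customer_profession",
     ["profession", "customerProfession", "customer_profession", "customerProfessionName"]),
   ("customer_name", ["name", "contact_name", "contactName", "customerName"])]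

-- canonical(key) = "".join(ch for ch in key.lower() if ch.isalnum()), kept as List Char
def pvCanon (s : String) : List Char :=
  (PySem.Chars.lower s.toList).filter PySem.Chars.isalnum

-- Python truthiness of an Optional[str]
def pvTruthy (o : Option String) : Bool := o.getD "" != ""

-- ===== PORT A =====
-- present_by_canonical = {canonical(str(k)): v for k, v in normalized.items() if v not in (None, "")}
def pvBuildPBC (items : List (String × String)) : PySem.Dict (List Char) String :=
  items.foldl
    (fun d kv => if kv.2 != "" then d.insert (pvCanon kv.1) kv.2 else d)
    PySem.Dict.empty

-- the inner 'for alias in aliases: … break' loop of A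
def pvTryA (pbc : PySem.Dict (List Char) String) (n : PySem.Dict String String)
    (target : String) : List String → PySem.Dict String String
  | [] => n
  | a :: rest =>
    let v := n.get? a
    let v := if pvTruthy v then v else pbc.get? (pvCanon a)
    if pvTruthy v then n.insert target (v.getD "") else pvTryA pbc n target rest

def normalize_template_vars_py (template_vars : List (String × String)) : List (String × String) :=
  let n0 : PySem.Dict String String := PySem.Dict.mk template_vars  -- normalized = dict(template_vars)
  let pbc := pvBuildPBC n0.items
  (pvAliasMap.foldl
    (fun n ta => if pvTruthy (n.get? ta.1) then n else pvTryA pbc n ta.1 ta.2) n0).items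

-- ===== PORT B =====
-- find_by_canonical: linear scan of the input, keeping the LAST non-empty canonically matching value
def pvFindByCanonical (template_vars : List (String × String)) (al : String) : Option String :=
  let wanted := pvCanon al
  template_vars.foldl
    (fun found kv => if kv.2 != "" && pvCanon kv.1 == wanted then some kv.2 else found)
    none

-- resolve: first alias whose direct lookup or canonical scan yields a truthy value
def pvResolve (template_vars : List (String × String)) (n : PySem.Dict String String) :
    List String → Option String
  | [] => none
  | a :: rest =>
    let v := if pvTruthy (n.get? a) then n.get? a else pvFindByCanonical template_vars a
    if pvTruthy v then v else pvResolve template_vars n rest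

def normalize_template_vars_py_alt (template_vars : List (String × String)) : List (String × String) :=
  let n0 : PySem.Dict String String := PySem.Dict.mk template_vars
  (pvAliasMap.foldl
    (fun n ta =>
      if pvTruthy (n.get? ta.1) then n
      else match pvResolve template_vars n ta.2 with
           | some v => n.insert ta.1 v
           | none => n) n0).items

-- ===== PRECONDITION & SPEC =====
def Spec_normalize_template_vars_py (template_vars : List (String × String)) (out : List (String × String)) : Prop := out = normalize_template_vars_py_alt template_vars
instance (template_vars : List (String × String)) (out : List (String × String)) : Decidable (Spec_normalize_template_vars_py template_vars out) := by unfold Spec_normalize_template_vars_py; infer_instance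

-- ===== CLAIM (what is proved, stated in full; the proofs are below) =====
def Claim_equal_normalize_template_vars_py : Prop := ∀ (template_vars : List (String × String)), Dom_normalize_template_vars_py template_vars → Spec_normalize_template_vars_py template_vars (normalize_template_vars_py template_vars)

-- ===== LEMMAS AND PROOFS =====

-- looking up a canonical key in A's comprehension dict is B's last-match scan
theorem pvPBC_get_eq_scan (items : List (String × String)) (c : List Char) :
    ∀ d : PySem.Dict (List Char) String,
      (items.foldl (fun d kv => if kv.2 != "" then d.insert (pvCanon kv.1) kv.2 else d) d).get? c
        = items.foldl
            (fun r kv => if kv.2 != "" && pvCanon kv.1 == c then some kv.2 else r) (d.get? c) := by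
  induction items with
  | nil => intro d; rfl
  | cons kv rest ih =>
    intro d
    simp only [List.foldl_cons]
    by_cases hv : kv.2 != ""
    · simp only [hv, if_true, Bool.true_and]
      rw [ih]
      by_cases hc : pvCanon kv.1 = c
      · subst hc; simp [PySem.Dict.get?_insert_self]
      · have : (pvCanon kv.1 == c) = false := by simp [hc]
        rw [this]
        simp only [if_false, Bool.false_eq_true]
        rw [PySem.Dict.get?_insert_of_ne _ _ (fun h => hc h.symm)]
    · simp only [hv, Bool.false_eq_true, if_false, Bool.false_and]
      exact ih d

theorem pvFind_eq_pbc (template_vars : List (String × String)) (a : String) :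
    pvFindByCanonical template_vars a = (pvBuildPBC template_vars).get? (pvCanon a) := by
  unfold pvFindByCanonical pvBuildPBC
  rw [pvPBC_get_eq_scan]
  rfl

-- A's inner alias loop equals B's resolve-then-insert
theorem pvTryA_eq_resolve (template_vars : List (String × String)) (n : PySem.Dict String String)
    (target : String) (al : List String) :
    pvTryA (pvBuildPBC template_vars) n target al
      = (match pvResolve template_vars n al with
         | some v => n.insert target v
         | none => n) := by
  induction al with
  | nil => rfl
  | cons a rest ih =>
    unfold pvTryA pvResolve
    rw [← pvFind_eq_pbc]
    by_cases h1 : pvTruthy (n.get? a)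
    · -- direct lookup truthy: get? a = some v with v ≠ ""
      simp only [h1, if_true]
      cases hg : n.get? a with
      | none => rw [hg] at h1; simp [pvTruthy] at h1
      | some v =>
        simp
    · simp only [h1, if_false, Bool.false_eq_true]
      by_cases h2 : pvTruthy (pvFindByCanonical template_vars a)
      · simp only [h2, if_true]
        cases hf : pvFindByCanonical template_vars a with
        | none => rw [hf] at h2; simp [pvTruthy] at h2
        | some v =>
          simp
      · simp only [h2, if_false, Bool.false_eq_true]
        exact ih

-- ===== VERDICT (by name: the statement is the Claim_ definition above) =====
theorem normalize_template_vars_py_spec : Claim_equal_normalize_template_vars_py := by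
  intro template_vars _
  unfold Spec_normalize_template_vars_py normalize_template_vars_py normalize_template_vars_py_alt
  dsimp only
  refine congrArg PySem.Dict.items ?_
  refine PySem.List.foldl_congr_mem _ _ _ _ ?_
  intro n ta _
  by_cases h : pvTruthy (n.get? ta.1)
  · simp [h]
  · simp only [h, if_false, Bool.false_eq_true]
    exact pvTryA_eq_resolve template_vars n ta.1 ta.2
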